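-- pv_equiv track=rewrite | github.com/aibenStunner/HackerRank | Algorithms/Greedy/PriyankaAndToys.py | toys
-- ===== SOURCE A (Python) =====
-- def toys(w):
--     container = 1
--     w.sort()
--     marker = w[0]
--     for toy in w:
--         if not marker+4 >= toy:
--             container += 1
--             marker = toy
--     return container
-- ===== SOURCE B (Python) =====
-- def toys(w):
--     # Repeated min-extraction: no sorting at all. Each round opens one container
--     # at the global minimum and discards everything within weight min+4.
--     # (Return-value equivalent to A; unlike A it does not sort w in place.)
--     count = 0
--     rem = w
--     while rem:
--         m = min(rem)
--         rem = [x for x in rem if x > m + 4]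
--         count += 1
--     return count
-- ===== Notes on version B (the rewrite author's own statement) =====
-- stated objective: alternative
-- what changed: Replaces sort-then-linear-greedy-scan with repeated global min-extraction: each round takes min(rem) and filters out every toy within min+4, counting rounds; no sorting and no marker state (note: B does not mutate w in place, equivalence is about the return value).
-- crash fix: On the empty list A raises IndexError (it indexes the first element before the loop) while B returns 0. — e.g. on toys([]): A raises IndexError, B returns 0
import Mathlib
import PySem

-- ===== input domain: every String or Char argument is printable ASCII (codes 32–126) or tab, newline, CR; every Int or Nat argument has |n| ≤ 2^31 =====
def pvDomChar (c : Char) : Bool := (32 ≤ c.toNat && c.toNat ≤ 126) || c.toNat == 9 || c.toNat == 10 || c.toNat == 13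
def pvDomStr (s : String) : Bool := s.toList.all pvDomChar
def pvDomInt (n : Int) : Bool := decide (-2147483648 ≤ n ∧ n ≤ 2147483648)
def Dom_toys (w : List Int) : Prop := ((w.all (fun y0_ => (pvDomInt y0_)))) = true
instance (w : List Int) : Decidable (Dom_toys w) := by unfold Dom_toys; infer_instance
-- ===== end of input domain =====

-- B replaces A's sort + running-marker scan by repeated global min-extraction (take min(rem),
-- filter out everything within min+4, count rounds); no sorting. A sorts w in place, B does not:
-- the equivalence proved is about the RETURN value. A raises IndexError on [], B returns 0.

-- ===== PORT A =====
-- A: container = 1; w.sort(); marker = w[0]; for toy in w: if not marker+4 >= toy: container += 1; marker = toy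
-- indexing the first element of the empty list raises IndexError: those inputs are excluded by Pre_toys; the [] branch is unreachable there.
def toys (w : List Int) : Int :=
  let s := PySem.List.sorted w (fun x => x) false
  match s with
  | [] => 0
  | m :: _ =>
    (s.foldl (fun (st : Int × Int) toy =>
        if ¬ (st.2 + 4 ≥ toy) then (st.1 + 1, toy) else st) (1, m)).1

-- ===== PORT B =====
-- filtering out a present element that fails the predicate strictly shortens the list
theorem length_filter_lt_of_mem (p : Int → Bool) : ∀ (l : List Int) (a : Int),
    a ∈ l → p a = false → (l.filter p).length < l.length := by
  intro l
  induction l with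
  | nil => intro a ha _; cases ha
  | cons y ys ih =>
    intro a ha hpa
    rcases List.mem_cons.1 ha with rfl | ha'
    · rw [List.filter_cons, hpa]
      exact Nat.lt_succ_of_le (List.length_filter_le _ _)
    · rw [List.filter_cons]
      by_cases hy : p y = true
      · rw [if_pos hy]
        simpa using Nat.succ_lt_succ (ih a ha' hpa)
      · rw [if_neg hy]
        exact Nat.lt_succ_of_lt (ih a ha' hpa)

-- running min: member of the list and a lower bound (used for toysLoop's termination)
theorem foldl_min_char (t : List Int) : ∀ (x : Int),
    t.foldl min x ∈ x :: t ∧ ∀ y ∈ x :: t, t.foldl min x ≤ y := by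
  induction t with
  | nil => intro x; simp
  | cons a t' ih =>
    intro x
    simp only [List.foldl_cons]
    obtain ⟨hmem, hle⟩ := ih (min x a)
    constructor
    · rcases List.mem_cons.1 hmem with h | h
      · rcases min_choice x a with hc | hc <;> rw [h, hc] <;> simp
      · simp [h]
    · intro y hy
      have hhead := hle (min x a) (List.mem_cons_self)
      rcases List.mem_cons.1 hy with rfl | hy'
      · exact le_trans hhead (min_le_left _ _)
      rcases List.mem_cons.1 hy' with rfl | hy''
      · exact le_trans hhead (min_le_right _ _)
      · exact hle y (List.mem_cons_of_mem _ hy'')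


-- while rem: m = min(rem); rem = [x for x in rem if x > m + 4]; count += 1
-- min(rem) on the nonempty list is the running-min loop (PySem.List.min?_id_cons).
def toysLoop (rem : List Int) (count : Int) : Int :=
  match rem with
  | [] => count
  | x :: t =>
    let m := t.foldl min x
    toysLoop ((x :: t).filter (fun v => decide (m + 4 < v))) (count + 1)
termination_by rem.length
decreasing_by
  simp only [List.foldl_attach]
  exact length_filter_lt_of_mem _ (x :: t) (t.foldl min x) (foldl_min_char t x).1 (decide_eq_false (by omega))

def toys_alt (w : List Int) : Int := toysLoop w 0

-- ===== PRECONDITION & SPEC =====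
-- Pre_ excludes exactly the empty list, on which A raises IndexError indexing the first element.
def Pre_toys (w : List Int) : Prop := w ≠ []
instance (w : List Int) : Decidable (Pre_toys w) := by unfold Pre_toys; infer_instance
def pvWitness_toys : List Int := [1, 6, 2]

-- On the empty list A raises IndexError (it indexes the first element before the loop) while B returns 0.
def Raises_toys (w : List Int) : Prop := w = []
instance (w : List Int) : Decidable (Raises_toys w) := by unfold Raises_toys; infer_instance
def pvRaiseWitness_toys : List Int := []
def pvRaiseWitnessOut_toys : Int := 0

def Spec_toys (w : List Int) (out : Int) : Prop := out = toys_alt w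
instance (w : List Int) (out : Int) : Decidable (Spec_toys w out) := by unfold Spec_toys; infer_instance

-- ===== CLAIM (what is proved, stated in full; the proofs are below) =====
def Claim_equal_toys : Prop := ∀ (w : List Int), Dom_toys w → Pre_toys w → Spec_toys w (toys w)
def Claim_raises_toys : Prop := (∀ (w : List Int), Dom_toys w → Raises_toys w → ¬ Pre_toys w) ∧ (Dom_toys (pvRaiseWitness_toys) ∧ Raises_toys (pvRaiseWitness_toys) ∧ toys_alt (pvRaiseWitness_toys) = pvRaiseWitnessOut_toys)

-- ===== LEMMAS AND PROOFS =====

-- the counting loop depends only on the multiset of remaining weights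
theorem toysLoop_perm : ∀ (n : ℕ) (r r' : List Int) (c : Int), r.length ≤ n →
    r.Perm r' → toysLoop r c = toysLoop r' c := by
  intro n
  induction n with
  | zero =>
    intro r r' c hlen hp
    have hr : r = [] := List.length_eq_zero_iff.1 (Nat.le_zero.1 hlen)
    subst hr
    have hr' : r' = [] := hp.symm.eq_nil
    subst hr'; rfl
  | succ n ih =>
    intro r r' c hlen hp
    match r, r' with
    | [], r' =>
      have hr' : r' = [] := hp.symm.eq_nil
      subst hr'; rfl
    | x :: t, [] => exact absurd hp.eq_nil (by simp)
    | x :: t, x' :: t' =>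
      obtain ⟨hmem, hle⟩ := foldl_min_char t x
      obtain ⟨hmem', hle'⟩ := foldl_min_char t' x'
      have hmm : t.foldl min x = t'.foldl min x' :=
        le_antisymm (hle _ (hp.symm.mem_iff.1 hmem')) (hle' _ (hp.mem_iff.1 hmem))
      simp only [toysLoop]
      simp only [← hmm]
      refine ih _ _ _ ?_ (hp.filter (fun v => decide (t.foldl min x + 4 < v)))
      have h := length_filter_lt_of_mem (fun v => decide (t.foldl min x + 4 < v))
        (x :: t) (t.foldl min x) hmem (decide_eq_false (by omega))
      have hl2 : t.length + 1 ≤ n + 1 := by simpa using hlen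
      simp only [List.length_cons] at h
      omega

-- A's fold, started at marker m, counts exactly the groups of the part of l beyond m's reach.
def toysGroups (l : List Int) : Int :=
  match l with
  | [] => 0
  | x :: rest => 1 + toysGroups (rest.dropWhile (fun t => decide (t ≤ x + 4)))
termination_by l.length
decreasing_by
  simp only [List.length_cons]
  exact Nat.lt_succ_of_le (List.length_dropWhile_le _ _)

theorem foldA_eq_groups (l : List Int) : ∀ (c m : Int),
    (l.foldl (fun (st : Int × Int) toy =>
        if ¬ (st.2 + 4 ≥ toy) then (st.1 + 1, toy) else st) (c, m)).1
      = c + toysGroups (l.dropWhile (fun t => decide (t ≤ m + 4))) := by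
  induction l with
  | nil => intro c m; simp [toysGroups]
  | cons t rest ih =>
    intro c m
    by_cases h : t ≤ m + 4
    · simp only [List.foldl_cons, List.dropWhile_cons]
      rw [if_neg (by omega), if_pos (by simpa using h)]
      exact ih c m
    · simp only [List.foldl_cons, List.dropWhile_cons]
      rw [if_pos (by omega), if_neg (by simpa using h)]
      rw [ih (c + 1) t, toysGroups]
      ring

-- on a sorted list the running min is the head
theorem foldl_min_head (t : List Int) : ∀ (x : Int), (∀ y ∈ t, x ≤ y) → t.foldl min x = x := by
  induction t with
  | nil => intro x _; rfl
  | cons a t' ih =>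
    intro x hx
    have : min x a = x := min_eq_left (hx a (by simp))
    simp only [List.foldl_cons, this]
    exact ih x (fun y hy => hx y (by simp [hy]))

-- on a sorted list, filtering above a threshold is dropping the prefix below it
theorem filter_eq_dropWhile_sorted (l : List Int) (a : Int) (hs : l.Pairwise (· ≤ ·)) :
    l.filter (fun v => decide (a < v)) = l.dropWhile (fun v => decide (v ≤ a)) := by
  induction l with
  | nil => rfl
  | cons y ys ih =>
    have hys := (List.pairwise_cons.1 hs).2
    by_cases h : y ≤ a
    · simp only [List.filter_cons, List.dropWhile_cons]
      rw [if_neg (by simpa using not_lt.2 h), if_pos (by simpa using h)]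
      exact ih hys
    · simp only [List.filter_cons, List.dropWhile_cons]
      rw [if_pos (by simpa using not_le.1 h), if_neg (by simpa using h)]
      congr 1
      exact List.filter_eq_self.2 (fun v hv => by
        have := (List.pairwise_cons.1 hs).1 v hv
        simp; omega)

-- on a sorted list the min-extraction loop counts exactly the greedy groups
theorem toysLoop_sorted : ∀ (n : ℕ) (l : List Int) (c : Int), l.length ≤ n →
    l.Pairwise (· ≤ ·) → toysLoop l c = c + toysGroups l := by
  intro n
  induction n with
  | zero =>
    intro l c hlen _
    have : l = [] := List.length_eq_zero_iff.1 (Nat.le_zero.1 hlen)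
    subst this; simp [toysLoop, toysGroups]
  | succ n ih =>
    intro l c hlen hs
    match l with
    | [] => simp [toysLoop, toysGroups]
    | x :: t =>
      have hxall := (List.pairwise_cons.1 hs).1
      have hmin : t.foldl min x = x := foldl_min_head t x hxall
      simp only [toysLoop, hmin]
      rw [filter_eq_dropWhile_sorted _ _ hs]
      have hdw : (x :: t).dropWhile (fun v => decide (v ≤ x + 4))
          = t.dropWhile (fun v => decide (v ≤ x + 4)) := by
        rw [List.dropWhile_cons, if_pos (by simp)]
      rw [hdw]
      conv_rhs => rw [show toysGroups (x :: t) = 1 + toysGroups (t.dropWhile (fun v => decide (v ≤ x + 4))) from by simp [toysGroups]]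
      rw [ih _ _ (by
            have := List.length_dropWhile_le (fun v => decide (v ≤ x + 4)) t
            simp only [List.length_cons] at hlen
            omega)
          (((List.pairwise_cons.1 hs).2).sublist (List.dropWhile_sublist _))]
      ring

-- ===== VERDICT (by name: the statement is the Claim_ definition above) =====
theorem toys_spec : Claim_equal_toys := by
  intro w _ hpre
  unfold Spec_toys toys toys_alt
  have hperm := PySem.List.sorted_perm w (fun x => x) false
  have hne : PySem.List.sorted w (fun x => x) false ≠ [] := by
    intro h
    exact hpre (List.Perm.eq_nil (h ▸ hperm).symm)
  cases hs : PySem.List.sorted w (fun x => x) false with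
  | nil => exact absurd hs hne
  | cons m t =>
    simp only [List.foldl_cons]
    rw [if_neg (by omega), foldA_eq_groups]
    rw [toysLoop_perm w.length w (m :: t) 0 le_rfl (hs ▸ hperm).symm]
    rw [toysLoop_sorted (m :: t).length (m :: t) 0 le_rfl
      (hs ▸ PySem.List.sorted_pairwise w (fun x => x))]
    conv_rhs => rw [show toysGroups (m :: t) = 1 + toysGroups (t.dropWhile (fun v => decide (v ≤ m + 4))) from by simp [toysGroups]]
    ring

theorem toys_raises : Claim_raises_toys := by
  unfold Claim_raises_toys
  refine ⟨fun w _ hr hp => hp hr, by decide, by decide, ?_⟩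
  simp [toys_alt, toysLoop, pvRaiseWitness_toys, pvRaiseWitnessOut_toys]

-- witness self-check: B's port really returns the stated value on the raise witness
theorem toys_raises_witness : toys_alt pvRaiseWitness_toys = pvRaiseWitnessOut_toys :=
  toys_raises.2.2.2
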